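-- pv_equiv track=rewrite | github.com/NeerajK1998/Industrial_Digital_Twin | src/asset_registry.py | _slug
-- ===== SOURCE A (Python) =====
-- def _slug(s: str) -> str:
--     s = s.strip().lower()
--     out = []
--     for ch in s:
--         if ch.isalnum():
--             out.append(ch)
--         elif ch in [" ", "-", "_"]:
--             out.append("-")
--     slug = "".join(out).strip("-")
--     while "--" in slug:
--         slug = slug.replace("--", "-")
--     return slug or "asset"
-- ===== SOURCE B (Python) =====
-- def _slug(s: str) -> str:
--     slug = ""
--     pending = False
--     for ch in s.strip().lower():
--         if ch.isalnum():
--             if pending: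
--                 slug += "-"
--                 pending = False
--             slug += ch
--         elif ch in " -_":
--             pending = bool(slug)
--     return slug or "asset"
-- ===== Notes on version B (the rewrite author's own statement) =====
-- stated objective: simpler
-- what changed: A marks every separator as a dash, then strips edge dashes and collapses runs of consecutive dashes with a repeated str.replace while-loop; B is a single pass over the string with a pending-separator flag that emits at most one dash lazily before the next alphanumeric character, so the strip and collapse phases disappear.
import Mathlib
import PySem

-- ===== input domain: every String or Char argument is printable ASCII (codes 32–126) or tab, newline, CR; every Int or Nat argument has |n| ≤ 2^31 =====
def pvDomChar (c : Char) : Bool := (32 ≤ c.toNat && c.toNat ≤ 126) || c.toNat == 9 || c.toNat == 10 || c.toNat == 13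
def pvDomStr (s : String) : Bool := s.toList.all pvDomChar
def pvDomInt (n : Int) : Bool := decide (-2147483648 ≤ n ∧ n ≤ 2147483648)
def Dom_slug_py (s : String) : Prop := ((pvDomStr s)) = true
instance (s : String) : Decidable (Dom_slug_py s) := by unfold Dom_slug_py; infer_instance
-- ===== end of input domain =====

-- B replaces A's three-phase pipeline (mark separators as dashes, strip edge dashes, collapse
-- runs of consecutive dashes in a while-replace loop) with a single pass holding a pending-separator flag that
-- emits each dash lazily, so no strip or collapse phase is needed (objective: simpler).

-- ===== PORT A =====
-- pvRep and the lemmas up to pvReplace_lt exist only to justify termination of the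
-- while-loop port pvWhileCollapse (each replace("--","-") strictly shortens the string);
-- pvWhileCollapse cites pvReplace_lt in its decreasing_by.
def pvRep : List Char → List Char
  | [] => []
  | [c] => [c]
  | c :: d :: t => if c = '-' ∧ d = '-' then '-' :: pvRep t else c :: pvRep (d :: t)

theorem pvGo_eq (fuel : Nat) (l acc : List Char) (h : l.length ≤ fuel) :
    PySem.Chars.replace.go ['-','-'] ['-'] fuel l acc = acc.reverse ++ pvRep l := by
  induction fuel generalizing l acc with
  | zero =>
    have : l = [] := by cases l <;> simp_all
    subst this
    simp [PySem.Chars.replace.go, pvRep]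
  | succ n ih =>
    cases l with
    | nil => simp [PySem.Chars.replace.go, pvRep]
    | cons c t =>
      rw [PySem.Chars.replace.go]
      by_cases hp : List.isPrefixOf ['-','-'] (c :: t)
      · simp only [hp, if_true]
        cases t with
        | nil => simp [List.isPrefixOf] at hp
        | cons d u =>
          have hc : c = '-' ∧ d = '-' := by
            have := (by simpa [List.isPrefixOf] using hp : '-' = c ∧ '-' = d)
            exact ⟨this.1.symm, this.2.symm⟩
          simp only [List.length_cons, List.drop_succ_cons, List.drop_zero, List.length_nil,
            Nat.zero_add]
          rw [ih u _ (by simp at h; omega)]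
          simp [pvRep, hc.1, hc.2]
      · simp only [hp, if_false]
        rw [ih t _ (by simp at h; omega)]
        cases t with
        | nil => simp [pvRep]
        | cons d u =>
          have : ¬ (c = '-' ∧ d = '-') := by
            intro ⟨h1, h2⟩; subst h1; subst h2; simp [List.isPrefixOf] at hp
          simp [pvRep, this]

theorem pvReplace_eq_rep (x : List Char) :
    PySem.Chars.replace x ['-','-'] ['-'] = pvRep x := by
  rw [PySem.Chars.replace]
  simp only [List.isEmpty_cons, if_false, Bool.false_eq_true]
  exact pvGo_eq x.length x [] le_rfl

theorem pvRep_length_le (x : List Char) : (pvRep x).length ≤ x.length := by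
  fun_induction pvRep x <;> simp_all <;> omega

theorem pvRep_length_lt (x : List Char) (h : ['-','-'] <:+: x) :
    (pvRep x).length < x.length := by
  fun_induction pvRep x with
  | case1 => simp at h
  | case2 c =>
      exfalso
      rcases h with ⟨p, q, hpq⟩
      have := congrArg List.length hpq; simp at this; omega
  | case3 c d t hcd ih =>
      have := pvRep_length_le t; simp; omega
  | case4 c d t hcd ih =>
      have h' : ['-','-'] <:+: d :: t := by
        rcases (List.infix_cons_iff.mp h) with hpre | htail
        · exfalso
          rcases hpre with ⟨q, hq⟩
          simp at hq
          exact hcd ⟨hq.1.symm, hq.2.1.symm⟩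
        · exact htail
      have := ih h'; simp only [List.length_cons] at this ⊢; omega

theorem pvReplace_lt (cs : List Char) (h : PySem.Chars.isIn ['-','-'] cs = true) :
    (PySem.Chars.replace cs ['-','-'] ['-']).length < cs.length := by
  rw [pvReplace_eq_rep]
  exact pvRep_length_lt cs (((PySem.Chars.isIn_iff_infix _ _).mp h))

def pvWhileCollapse (cs : List Char) : List Char :=
  if h : PySem.Chars.isIn ['-','-'] cs = true then
    pvWhileCollapse (PySem.Chars.replace cs ['-','-'] ['-'])
  else cs
termination_by cs.length
decreasing_by exact pvReplace_lt cs h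

-- the transliteration of A: build `out`, strip edge dashes, while-replace double dashes, default "asset"
def slug_py (s : String) : String :=
  let t := PySem.Chars.lower (PySem.Chars.strip s.toList)
  let out := t.foldl (fun (acc : List Char) ch =>
      if PySem.Chars.isalnum ch then acc ++ [ch]
      else if ch ∈ [' ', '-', '_'] then acc ++ ['-'] else acc) []
  let slug := pvWhileCollapse (PySem.Chars.stripChars out ['-'])
  if slug.isEmpty then "asset" else String.mk slug


-- ===== PORT B =====
def slug_py_alt (s : String) : String :=
  let t := PySem.Chars.lower (PySem.Chars.strip s.toList)
  let st := t.foldl (fun (st : List Char × Bool) ch =>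
      if PySem.Chars.isalnum ch then ((if st.2 then st.1 ++ ['-'] else st.1) ++ [ch], false)
      else if ch ∈ [' ', '-', '_'] then (st.1, !st.1.isEmpty)
      else st) ([], false)
  if st.1.isEmpty then "asset" else String.mk st.1


-- ===== PRECONDITION & SPEC =====
-- A returns normally on every string, so there is no Pre_.
def Spec_slug_py (s : String) (out : String) : Prop := out = slug_py_alt s
instance (s : String) (out : String) : Decidable (Spec_slug_py s out) := by unfold Spec_slug_py; infer_instance

-- ===== CLAIM (what is proved, stated in full; the proofs are below) =====
def Claim_equal_slug_py : Prop := ∀ (s : String), Dom_slug_py s → Spec_slug_py s (slug_py s)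

-- ===== LEMMAS AND PROOFS =====
theorem pvRep_cons₂ (c d : Char) (t : List Char) :
    pvRep (c :: d :: t) = if c = '-' ∧ d = '-' then '-' :: pvRep t else c :: pvRep (d :: t) := rfl

def pvDash (c : Char) : Bool := c == '-'

def pvCollapse : List Char → List Char
  | [] => []
  | c :: t =>
    if c = '-' then '-' :: pvCollapse (t.dropWhile pvDash)
    else c :: pvCollapse t
termination_by l => l.length
decreasing_by
  · have := List.length_dropWhile_le pvDash t; simp; omega
  · simp

theorem pvCollapse_cons (c : Char) (t : List Char) :
    pvCollapse (c :: t) =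
      if c = '-' then '-' :: pvCollapse (t.dropWhile pvDash) else c :: pvCollapse t := by
  rw [pvCollapse]

def pvM : Bool → List Char → List Char
  | _, [] => []
  | pend, c :: t =>
    if c = '-' then pvM true t
    else (if pend then ['-'] else []) ++ c :: pvM false t

theorem pvM_cons (pend : Bool) (c : Char) (t : List Char) :
    pvM pend (c :: t) =
      if c = '-' then pvM true t else (if pend then ['-'] else []) ++ c :: pvM false t := rfl

-- collapse is unchanged by one rep step
theorem pvCollapse_rep (n : Nat) :
    ∀ x : List Char, x.length ≤ n →
      pvCollapse (pvRep x) = pvCollapse x ∧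
      pvCollapse ((pvRep x).dropWhile pvDash) = pvCollapse (x.dropWhile pvDash) := by
  induction n with
  | zero =>
    intro x hx
    have : x = [] := by cases x <;> simp_all
    subst this; exact ⟨rfl, rfl⟩
  | succ n ih =>
    intro x hx
    match x with
    | [] => exact ⟨rfl, rfl⟩
    | [c] => exact ⟨rfl, rfl⟩
    | c :: d :: t =>
      rw [pvRep_cons₂]
      by_cases hcd : c = '-' ∧ d = '-'
      · rw [if_pos hcd]
        obtain ⟨hc, hd⟩ := hcd; subst hc; subst hd
        have iht := ih t (by simp at hx; omega)
        constructor
        · rw [pvCollapse_cons, pvCollapse_cons]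
          simp only [if_pos rfl]
          rw [show (('-' :: t).dropWhile pvDash) = t.dropWhile pvDash by simp [pvDash]]
          rw [iht.2]
          simp
        · rw [show (('-' :: pvRep t).dropWhile pvDash) = (pvRep t).dropWhile pvDash by simp [pvDash]]
          rw [show (('-' :: '-' :: t).dropWhile pvDash) = t.dropWhile pvDash by simp [pvDash]]
          have h1 : pvCollapse ((pvRep t).dropWhile pvDash) = pvCollapse (t.dropWhile pvDash) := iht.2
          -- need: collapse (dropWhile (rep t)) = collapse (dropWhile t): exactly iht.2
          exact h1
      · rw [if_neg hcd]
        have ihdt := ih (d :: t) (by simp at hx ⊢; omega)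
        by_cases hc : c = '-'
        · subst hc
          have hd : ¬ d = '-' := fun h => hcd ⟨rfl, h⟩
          constructor
          · rw [pvCollapse_cons, pvCollapse_cons, if_pos rfl, if_pos rfl]
            rw [show ((d :: t).dropWhile pvDash) = d :: t by simp [pvDash, hd]]
            rw [show ((pvRep (d :: t)).dropWhile pvDash) = pvRep (d :: t) by
              cases t with
              | nil => simp [pvRep, pvDash, hd]
              | cons e u =>
                rw [pvRep_cons₂, if_neg (fun h => hd h.1)]
                simp [pvDash, hd]]
            rw [ihdt.1]
          · rw [show (('-' :: pvRep (d :: t)).dropWhile pvDash) = (pvRep (d :: t)).dropWhile pvDash by simp [pvDash]]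
            rw [show (('-' :: d :: t).dropWhile pvDash) = (d :: t).dropWhile pvDash by simp [pvDash]]
            exact ihdt.2
        · constructor
          · rw [pvCollapse_cons, pvCollapse_cons, if_neg hc, if_neg hc, ihdt.1]
          · rw [show ((c :: pvRep (d :: t)).dropWhile pvDash) = c :: pvRep (d :: t) by simp [pvDash, hc]]
            rw [show ((c :: d :: t).dropWhile pvDash) = c :: d :: t by simp [pvDash, hc]]
            rw [pvCollapse_cons, pvCollapse_cons, if_neg hc, if_neg hc, ihdt.1]

-- no "--" ⇒ collapse is the identity
theorem pvCollapse_no_dd : ∀ x : List Char, ¬ (['-','-'] <:+: x) → pvCollapse x = x := by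
  intro x
  induction x with
  | nil => intro _; rw [pvCollapse]
  | cons c t ih =>
    intro h
    have ht : ¬ (['-','-'] <:+: t) := fun h' => h (h'.trans (List.suffix_cons c t).isInfix) -- check name
    rw [pvCollapse_cons]
    by_cases hc : c = '-'
    · subst hc
      rw [if_pos rfl]
      have hhd : t.dropWhile pvDash = t := by
        cases t with
        | nil => rfl
        | cons d u =>
          have hd : ¬ d = '-' := by
            intro hd; subst hd
            exact h ⟨[], u, by simp⟩
          simp [pvDash, hd]
      rw [hhd, ih ht]
    · rw [if_neg hc, ih ht]


theorem pvWhileCollapse_eq (n : Nat) : ∀ cs : List Char, cs.length ≤ n →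
    pvWhileCollapse cs = pvCollapse cs := by
  induction n with
  | zero =>
    intro cs h
    have : cs = [] := by cases cs <;> simp_all
    subst this
    rw [pvWhileCollapse]
    simp [PySem.Chars.isIn, PySem.Chars.find, PySem.Chars.find.go]
    rw [pvCollapse]
  | succ n ih =>
    intro cs h
    rw [pvWhileCollapse]
    by_cases hin : PySem.Chars.isIn ['-','-'] cs = true
    · rw [dif_pos hin]
      have hlt := pvReplace_lt cs hin
      rw [ih _ (by omega)]
      rw [pvReplace_eq_rep]
      exact (pvCollapse_rep cs.length cs le_rfl).1
    · rw [dif_neg hin]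
      exact (pvCollapse_no_dd cs (fun hi => hin (((PySem.Chars.isIn_iff_infix _ _).mpr hi)))).symm


def pvRstrip (l : List Char) : List Char := (l.reverse.dropWhile pvDash).reverse

theorem pvStripChars_eq (p : List Char) :
    PySem.Chars.stripChars p ['-'] = pvRstrip (p.dropWhile pvDash) := by
  have hfun : (fun c => (['-'] : List Char).contains c) = pvDash := by
    funext c
    by_cases h : c = '-' <;> simp [pvDash, h]
  rw [PySem.Chars.stripChars]
  simp only [hfun]
  rfl

theorem pvRstrip_cons_ne (c : Char) (t : List Char) (hc : ¬ c = '-') :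
    pvRstrip (c :: t) = c :: pvRstrip t := by
  unfold pvRstrip
  rw [show (c :: t).reverse = t.reverse ++ [c] from by simp]
  rw [List.dropWhile_append]
  by_cases he : (t.reverse.dropWhile pvDash).isEmpty
  · simp only [he, if_pos]
    have : List.dropWhile pvDash [c] = [c] := by simp [pvDash, hc]
    rw [this]
    have h2 : t.reverse.dropWhile pvDash = [] := by simpa [List.isEmpty_iff] using he
    simp [h2]
  · simp only [he, if_neg]
    simp

theorem pvRstrip_all_dash (t : List Char) (h : ∀ x ∈ t, x = '-') : pvRstrip t = [] := by
  unfold pvRstrip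
  rw [List.dropWhile_eq_nil_iff.mpr]
  · rfl
  · intro x hx
    simp [pvDash, h x (List.mem_reverse.mp hx)]

theorem pvRstrip_cons_dash (t : List Char) (h : ∃ x ∈ t, ¬ x = '-') :
    pvRstrip ('-' :: t) = '-' :: pvRstrip t := by
  unfold pvRstrip
  rw [show ('-' :: t).reverse = t.reverse ++ ['-'] from by simp]
  rw [List.dropWhile_append]
  have hne : ¬ (t.reverse.dropWhile pvDash).isEmpty = true := by
    obtain ⟨x, hx, hxd⟩ := h
    simp only [List.isEmpty_iff, List.dropWhile_eq_nil_iff]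
    intro hall
    exact hxd (by simpa [pvDash] using hall x (List.mem_reverse.mpr hx))
  rw [if_neg hne]
  simp

theorem pvM_all_dash (pend : Bool) (t : List Char) (h : ∀ x ∈ t, x = '-') : pvM pend t = [] := by
  induction t generalizing pend with
  | nil => rfl
  | cons c u ih =>
    rw [pvM_cons, if_pos (h c (by simp))]
    exact ih true (fun x hx => h x (by simp [hx]))

theorem pvDropWhile_rstrip_comm (t : List Char) (h : ∃ x ∈ t, ¬ x = '-') :
    (pvRstrip t).dropWhile pvDash = pvRstrip (t.dropWhile pvDash) := by
  induction t with
  | nil => simp at h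
  | cons c u ih =>
    by_cases hc : c = '-'
    · subst hc
      have hu : ∃ x ∈ u, ¬ x = '-' := by
        obtain ⟨x, hx, hxd⟩ := h
        rcases List.mem_cons.mp hx with h1 | h2
        · exact absurd h1 hxd
        · exact ⟨x, h2, hxd⟩
      rw [pvRstrip_cons_dash u hu]
      rw [show List.dropWhile pvDash ('-' :: pvRstrip u) = List.dropWhile pvDash (pvRstrip u) from by simp [pvDash]]
      rw [show List.dropWhile pvDash ('-' :: u) = List.dropWhile pvDash u from by simp [pvDash]]
      exact ih hu
    · rw [pvRstrip_cons_ne c u hc]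
      rw [show List.dropWhile pvDash (c :: pvRstrip u) = c :: pvRstrip u from by simp [pvDash, hc]]
      rw [show List.dropWhile pvDash (c :: u) = c :: u from by simp [pvDash, hc]]
      rw [pvRstrip_cons_ne c u hc]

theorem pvM_true_eq (t : List Char) (h : ∃ x ∈ t, ¬ x = '-') :
    pvM true t = '-' :: pvM false (t.dropWhile pvDash) := by
  induction t with
  | nil => simp at h
  | cons c u ih =>
    by_cases hc : c = '-'
    · subst hc
      rw [pvM_cons, if_pos rfl]
      rw [show List.dropWhile pvDash ('-' :: u) = List.dropWhile pvDash u from by simp [pvDash]]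
      apply ih
      obtain ⟨x, hx, hxd⟩ := h
      rcases List.mem_cons.mp hx with h1 | h2
      · exact absurd h1 hxd
      · exact ⟨x, h2, hxd⟩
    · rw [pvM_cons, if_neg hc]
      rw [show List.dropWhile pvDash (c :: u) = c :: u from by simp [pvDash, hc]]
      rw [pvM_cons, if_neg hc]
      simp

-- the central bridge: collapse of right-stripped list = pvM false
theorem pvG (n : Nat) : ∀ t : List Char, t.length ≤ n →
    pvCollapse (pvRstrip t) = pvM false t := by
  induction n with
  | zero =>
    intro t ht
    have : t = [] := by cases t <;> simp_all
    subst this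
    rw [show pvRstrip [] = [] from rfl, pvCollapse]
    rfl
  | succ n ih =>
    intro t ht
    cases t with
    | nil =>
      rw [show pvRstrip [] = [] from rfl, pvCollapse]; rfl
    | cons c u =>
      by_cases hc : c = '-'
      · subst hc
        rw [pvM_cons, if_pos rfl]
        by_cases hall : ∀ x ∈ u, x = '-'
        · rw [pvRstrip_all_dash _ (fun x hx => by rcases List.mem_cons.mp hx with h1 | h2; exact h1; exact hall x h2)]
          rw [pvCollapse, pvM_all_dash true u hall]
        · push_neg at hall
          have hex : ∃ x ∈ u, ¬ x = '-' := by
            obtain ⟨x, hx, hxd⟩ := hall; exact ⟨x, hx, hxd⟩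
          rw [pvRstrip_cons_dash u hex, pvCollapse_cons, if_pos rfl]
          rw [pvDropWhile_rstrip_comm u hex]
          rw [ih _ (by
            have := List.length_dropWhile_le pvDash u
            simp at ht; omega)]
          rw [pvM_true_eq u hex]
      · rw [pvRstrip_cons_ne c u hc, pvCollapse_cons, if_neg hc, pvM_cons, if_neg hc]
        rw [ih u (by simp at ht; omega)]
        simp


def pvEnc (ch : Char) : Option Char :=
  if PySem.Chars.isalnum ch then some ch
  else if ch ∈ [' ', '-', '_'] then some '-' else none

def pvStepB' (st : List Char × Bool) (c : Char) : List Char × Bool :=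
  if c = '-' then (st.1, !st.1.isEmpty)
  else ((if st.2 then st.1 ++ ['-'] else st.1) ++ [c], false)

theorem pvFoldA (t : List Char) : ∀ acc : List Char,
    t.foldl (fun (acc : List Char) ch =>
      if PySem.Chars.isalnum ch then acc ++ [ch]
      else if ch ∈ [' ', '-', '_'] then acc ++ ['-'] else acc) acc
    = acc ++ t.filterMap pvEnc := by
  induction t with
  | nil => simp
  | cons c u ih =>
    intro acc
    simp only [List.foldl_cons, List.filterMap_cons]
    by_cases h1 : PySem.Chars.isalnum c
    · rw [show pvEnc c = some c from by rw [pvEnc, if_pos h1]]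
      rw [if_pos h1, ih]
      simp
    · by_cases h2 : c ∈ [' ', '-', '_']
      · rw [show pvEnc c = some '-' from by rw [pvEnc, if_neg h1, if_pos h2]]
        rw [if_neg h1, if_pos h2, ih]
        simp
      · rw [show pvEnc c = none from by rw [pvEnc, if_neg h1, if_neg h2]]
        rw [if_neg h1, if_neg h2, ih]

theorem pvAlnum_ne_dash (ch : Char) (h : PySem.Chars.isalnum ch = true) : ¬ ch = '-' := by
  intro he; subst he; exact absurd h (by decide)

theorem pvFoldB_factor (t : List Char) : ∀ st : List Char × Bool,
    t.foldl (fun (st : List Char × Bool) ch =>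
      if PySem.Chars.isalnum ch then ((if st.2 then st.1 ++ ['-'] else st.1) ++ [ch], false)
      else if ch ∈ [' ', '-', '_'] then (st.1, !st.1.isEmpty)
      else st) st
    = (t.filterMap pvEnc).foldl pvStepB' st := by
  induction t with
  | nil => simp
  | cons c u ih =>
    intro st
    simp only [List.foldl_cons, List.filterMap_cons]
    by_cases h1 : PySem.Chars.isalnum c
    · rw [show pvEnc c = some c from by rw [pvEnc, if_pos h1]]
      rw [if_pos h1, List.foldl_cons, ih]
      rw [show pvStepB' st c = ((if st.2 then st.1 ++ ['-'] else st.1) ++ [c], false) from by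
        rw [pvStepB', if_neg (pvAlnum_ne_dash c h1)]]
    · by_cases h2 : c ∈ [' ', '-', '_']
      · rw [show pvEnc c = some '-' from by rw [pvEnc, if_neg h1, if_pos h2]]
        rw [if_neg h1, if_pos h2, List.foldl_cons, ih]
        rw [show pvStepB' st '-' = (st.1, !st.1.isEmpty) from by rw [pvStepB', if_pos rfl]]
      · rw [show pvEnc c = none from by rw [pvEnc, if_neg h1, if_neg h2]]
        rw [if_neg h1, if_neg h2, ih]

theorem pvB2 (p : List Char) : ∀ (acc : List Char) (pend : Bool), acc ≠ [] →
    (p.foldl pvStepB' (acc, pend)).1 = acc ++ pvM pend p := by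
  induction p with
  | nil => intro acc pend _; simp [pvM]
  | cons c u ih =>
    intro acc pend hacc
    rw [List.foldl_cons, pvM_cons]
    by_cases hc : c = '-'
    · subst hc
      rw [show pvStepB' (acc, pend) '-' = (acc, !acc.isEmpty) from by rw [pvStepB', if_pos rfl]]
      rw [ih acc _ hacc]
      rw [if_pos rfl]
      congr 1
      cases acc with
      | nil => exact absurd rfl hacc
      | cons a b => simp
    · rw [show pvStepB' (acc, pend) c = ((if pend then acc ++ ['-'] else acc) ++ [c], false) from by
        rw [pvStepB', if_neg hc]]
      rw [ih _ _ (by by_cases hp : pend <;> simp [hp])]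
      rw [if_neg hc]
      by_cases hp : pend <;> simp [hp]

theorem pvBres (p : List Char) : (p.foldl pvStepB' ([], false)).1
    = pvCollapse (PySem.Chars.stripChars p ['-']) := by
  induction p with
  | nil =>
    rw [pvStripChars_eq]
    rw [show pvRstrip (List.dropWhile pvDash []) = [] from rfl, pvCollapse]
    rfl
  | cons c u ih =>
    by_cases hc : c = '-'
    · subst hc
      rw [List.foldl_cons]
      rw [show pvStepB' ([], false) '-' = ([], false) from by rw [pvStepB', if_pos rfl]; rfl]
      rw [ih, pvStripChars_eq, pvStripChars_eq]
      rw [show List.dropWhile pvDash ('-' :: u) = List.dropWhile pvDash u from by simp [pvDash]]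
    · rw [List.foldl_cons]
      rw [show pvStepB' ([], false) c = ([c], false) from by rw [pvStepB', if_neg hc]; rfl]
      rw [pvB2 u [c] false (by simp)]
      rw [pvStripChars_eq]
      rw [show List.dropWhile pvDash (c :: u) = c :: u from by simp [pvDash, hc]]
      rw [pvRstrip_cons_ne c u hc, pvCollapse_cons, if_neg hc]
      rw [pvG u.length u le_rfl]
      simp


theorem pvMain (s : String) : slug_py s = slug_py_alt s := by
  simp only [slug_py, slug_py_alt]
  rw [pvFoldA, pvFoldB_factor, pvBres]
  rw [pvWhileCollapse_eq _ _ le_rfl]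
  simp

-- ===== VERDICT (by name: the statement is the Claim_ definition above) =====
theorem slug_py_spec : Claim_equal_slug_py := by
  intro s _
  unfold Spec_slug_py
  exact pvMain s
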